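-- pv_equiv track=rewrite | github.com/dudamarlena/pyc_source | pycfiles/cpipe-0.0.1.tar/PpTokeniser.py | _sliceFloatingLiteralDigitSequence
-- ===== SOURCE A (Python) =====
-- CHAR_SET_MAP = {'lex.charset': {'source character set': set('abcdefghijklmnopqrstuvwxyzABCDEFGHIJKLMNOPQRSTUVWXYZ0123456789_{}[]#()<>%:;.?*+-/^&|~!=,\\"\'\t\x0b\x0c\n '),
--                    'ucn ordinals': set((36, 64, 96))},
--    'lex.ppnumber': {'digit': set('0123456789'),
--                     'nonzero-digit': set('123456789'),
--                     'octal-digit': set('01234567'),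
--                     'hexadecimal-digit': set('0123456789abcdefABCDEF')},
--    'lex.header': {'h-char_omit': set('\n>'),
--                   'q-char_omit': set('\n"'),
--                   'undefined_h_words': set(("'", '\\', '"', '//', '/*')),
--                   'undefined_q_words': set(("'", '\\', '/*', '//'))},
--    'lex.name': {'part_non_digit': set(('_', 'a', 'b', 'c', 'd', 'e', 'f', 'g', 'h', 'i', 'j', 'k', 'l', 'm', 'n', 'o',
--      'p', 'q', 'r', 's', 't', 'u', 'v', 'w', 'x', 'y', 'z', 'A', 'B', 'C', 'D', 'E',
--      'F', 'G', 'H', 'I', 'J', 'K', 'L', 'M', 'N', 'O', 'P', 'Q', 'R', 'S', 'T', 'U',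
--      'V', 'W', 'X', 'Y', 'Z', '$', '@', '`'))},
--    'lex.key': {'keywords': set(('asm', 'do', 'if', 'return', 'typedef', 'auto', 'double', 'inline', 'short', 'typeid',
--      'bool', 'dynamic_cast', 'int', 'signed', 'typename', 'break', 'else', 'long',
--      'sizeof', 'union', 'case', 'enum', 'mutable', 'static', 'unsigned', 'catch',
--      'explicit', 'namespace', 'static_cast', 'using', 'char', 'export', 'new', 'struct',
--      'virtual', 'class', 'extern', 'operator', 'switch', 'void', 'const', 'false',
--      'private', 'template', 'volatile', 'const_cast', 'float', 'protected', 'this',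
--      'wchar_t', 'continue', 'for', 'public', 'throw', 'while', 'default', 'friend',
--      'register', 'true', 'delete', 'goto', 'reinterpret_cast', 'try'))},
--    'lex.op': {'operators': set(('{', '}', '[', ']', '#', '##', '(', ')', '<:', ':>', '<%', '%>', '%:', '%:%:',
--      ';', ':', '...', 'new', 'delete', '?', '::', '.', '.*', '+', '-', '*', '/',
--      '%', '^', '&', '|', '~', '!', '=', '<', '>', '+=', '-=', '*=', '/=', '%=', '^=',
--      '&=', '|=', '<<', '>>', '>>=', '<<=', '==', '!=', '<=', '>=', '&&', '||', '++',
--      '--', ',', '->*', '->', 'and', 'and_eq', 'bitand', 'bitor', 'compl', 'not',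
--      'not_eq', 'or', 'or_eq', 'xor', 'xor_eq'))},
--    'lex.icon': {'unsigned-suffix': set('uU'),
--                 'long-suffix': set('lL')},
--    'lex.ccon': {'simple-escape-sequence': set('\'"?\\abfnrtv'),
--                 'c-con_omit': set("'\\\n")},
--    'lex.fcon': {'floating-suffix': set('flFL'),
--                 'sign': set('-+'),
--                 'exponent_prefix': set('eE')},
--    'lex.string': {'s-char_omit': set('"\\\n')},
--    'lex.bool': {'set': set(('false', 'true'))},
--    'cpp': {'lparen': '(',
--            'new-line': '\n'}}
--
-- def _sliceFloatingLiteralDigitSequence(theBuf, theOfs):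
--     """ISO/IEC 14882:1998(E) 2.13.3 Floating literals [lex.fcon] - digit-sequence."""
--     i = theOfs
--     try:
--         while theBuf[i] in CHAR_SET_MAP['lex.ppnumber']['digit']:
--             i += 1
--
--     except IndexError:
--         pass
--
--     return i - theOfs
-- ===== SOURCE B (Python) =====
-- def _sliceFloatingLiteralDigitSequence(theBuf, theOfs):
--     """ISO/IEC 14882:1998(E) 2.13.3 Floating literals [lex.fcon] - digit-sequence."""
--     s = theBuf[theOfs:]
--     return len(s) - len(s.lstrip('0123456789'))
-- ===== Notes on version B (the rewrite author's own statement) =====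
-- stated objective: simpler
-- what changed: Replaces A's try/except indexed while-loop with a single slice theBuf[theOfs:] plus len(s) - len(s.lstrip('0123456789')), counting the leading digits of the tail without any index arithmetic or exception handling.
-- intended difference: On negative offsets whose tail theBuf[theOfs:] is all digits (or that underflow the buffer), A's negative-index wraparound re-scans the buffer's leading digits and returns a too-large count (e.g. 2 on ('5', -1), 0 on ('5', -3)); B returns the number of digits in theBuf[theOfs:] (1 in both examples), which is the intended digit-sequence length at that position. — e.g. on _sliceFloatingLiteralDigitSequence("5", -1): A returns 2, B returns 1
import Mathlib
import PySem

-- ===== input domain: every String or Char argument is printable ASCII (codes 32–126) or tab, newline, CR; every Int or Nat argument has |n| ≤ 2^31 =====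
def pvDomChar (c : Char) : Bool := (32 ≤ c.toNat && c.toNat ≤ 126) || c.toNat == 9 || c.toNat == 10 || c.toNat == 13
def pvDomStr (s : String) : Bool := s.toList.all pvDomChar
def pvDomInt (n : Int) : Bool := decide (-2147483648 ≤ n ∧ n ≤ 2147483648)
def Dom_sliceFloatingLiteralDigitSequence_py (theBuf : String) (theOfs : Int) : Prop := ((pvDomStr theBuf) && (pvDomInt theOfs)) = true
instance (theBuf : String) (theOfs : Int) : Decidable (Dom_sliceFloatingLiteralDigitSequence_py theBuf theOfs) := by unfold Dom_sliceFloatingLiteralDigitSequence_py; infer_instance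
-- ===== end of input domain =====

-- B counts the leading digits of theBuf[theOfs:] with slice + lstrip instead of A's
-- try/except indexed scan (objective: simpler); on negative offsets whose tail is all
-- digits A's negative-index wraparound re-scans the front of the buffer (see D_ below).

-- ===== PORT A =====
-- CHAR_SET_MAP['lex.ppnumber']['digit'] = set('0123456789')
def pvDigits : List Char := "0123456789".toList

-- the `while theBuf[i] in digits: i += 1` loop of A, wrapped in try/except IndexError
def pvLoopA (l : List Char) (i : Int) : Int :=
  match h : PySem.List.pyGet? l i with
  | some c => if pvDigits.contains c then pvLoopA l (i + 1) else i
  | none => i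
termination_by ((l.length : Int) - i).toNat
decreasing_by
  have hr : PySem.Raise.InRange l.length i := by
    by_contra hn
    simp [(PySem.List.pyGet?_eq_none_iff l i).2 hn] at h
  have : i < (l.length : Int) := hr.2
  omega

def sliceFloatingLiteralDigitSequence_py (theBuf : String) (theOfs : Int) : Int :=
  pvLoopA theBuf.toList theOfs - theOfs

-- ===== PORT B =====
-- s = theBuf[theOfs:]; return len(s) - len(s.lstrip('0123456789'))
def sliceFloatingLiteralDigitSequence_py_alt (theBuf : String) (theOfs : Int) : Int :=
  let s := PySem.List.slice theBuf.toList (some theOfs) none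
  (s.length : Int) - (s.dropWhile (fun c => pvDigits.contains c)).length

-- ===== PRECONDITION & SPEC =====
-- On negative offsets whose tail slice is all digits (or that underflow the buffer),
-- A's negative-index wraparound makes it re-scan the buffer's leading digits and return
-- a too-large count (e.g. 2 on ("5", -1)); B returns the count of digits in theBuf[theOfs:],
-- the intended digit-sequence length.
def D_sliceFloatingLiteralDigitSequence_py (theBuf : String) (theOfs : Int) : Prop :=
  theOfs < 0 ∧ theBuf.toList ≠ [] ∧
    ((theBuf.toList.take 1).all (fun c => pvDigits.contains c)) = true ∧
    (theOfs < -(theBuf.toList.length : Int) ∨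
      ((theBuf.toList.drop (theBuf.toList.length - (-theOfs).toNat)).all
        (fun c => pvDigits.contains c)) = true)
instance (theBuf : String) (theOfs : Int) : Decidable (D_sliceFloatingLiteralDigitSequence_py theBuf theOfs) := by
  unfold D_sliceFloatingLiteralDigitSequence_py; infer_instance

def Spec_sliceFloatingLiteralDigitSequence_py (theBuf : String) (theOfs : Int) (out : Int) : Prop :=
  ¬ D_sliceFloatingLiteralDigitSequence_py theBuf theOfs → out = sliceFloatingLiteralDigitSequence_py_alt theBuf theOfs
instance (theBuf : String) (theOfs : Int) (out : Int) : Decidable (Spec_sliceFloatingLiteralDigitSequence_py theBuf theOfs out) := by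
  unfold Spec_sliceFloatingLiteralDigitSequence_py; infer_instance

def pvDiffWitness_sliceFloatingLiteralDigitSequence_py : String × Int := ("5", -1)
def pvDiffWitnessOut_sliceFloatingLiteralDigitSequence_py : Int × Int := (2, 1)

-- ===== CLAIM (what is proved, stated in full; the proofs are below) =====
def Claim_unchanged_sliceFloatingLiteralDigitSequence_py : Prop := ∀ (theBuf : String) (theOfs : Int), Dom_sliceFloatingLiteralDigitSequence_py theBuf theOfs → Spec_sliceFloatingLiteralDigitSequence_py theBuf theOfs (sliceFloatingLiteralDigitSequence_py theBuf theOfs)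
def Claim_changed_sliceFloatingLiteralDigitSequence_py : Prop := Dom_sliceFloatingLiteralDigitSequence_py (pvDiffWitness_sliceFloatingLiteralDigitSequence_py.1) (pvDiffWitness_sliceFloatingLiteralDigitSequence_py.2) ∧ D_sliceFloatingLiteralDigitSequence_py (pvDiffWitness_sliceFloatingLiteralDigitSequence_py.1) (pvDiffWitness_sliceFloatingLiteralDigitSequence_py.2) ∧ sliceFloatingLiteralDigitSequence_py (pvDiffWitness_sliceFloatingLiteralDigitSequence_py.1) (pvDiffWitness_sliceFloatingLiteralDigitSequence_py.2) = pvDiffWitnessOut_sliceFloatingLiteralDigitSequence_py.1 ∧ sliceFloatingLiteralDigitSequence_py_alt (pvDiffWitness_sliceFloatingLiteralDigitSequence_py.1) (pvDiffWitness_sliceFloatingLiteralDigitSequence_py.2) = pvDiffWitnessOut_sliceFloatingLiteralDigitSequence_py.2 ∧ pvDiffWitnessOut_sliceFloatingLiteralDigitSequence_py.1 ≠ pvDiffWitnessOut_sliceFloatingLiteralDigitSequence_py.2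
def Claim_exact_sliceFloatingLiteralDigitSequence_py : Prop := ∀ (theBuf : String) (theOfs : Int), Dom_sliceFloatingLiteralDigitSequence_py theBuf theOfs → D_sliceFloatingLiteralDigitSequence_py theBuf theOfs → sliceFloatingLiteralDigitSequence_py theBuf theOfs ≠ sliceFloatingLiteralDigitSequence_py_alt theBuf theOfs

-- ===== LEMMAS AND PROOFS =====

-- abbreviation used only in the proofs
def pvDig (c : Char) : Bool := pvDigits.contains c

lemma pvLoopA_some {l : List Char} {i : Int} {c : Char}
    (h : PySem.List.pyGet? l i = some c) :
    pvLoopA l i = if pvDigits.contains c then pvLoopA l (i + 1) else i := by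
  rw [pvLoopA]
  split
  · next c' heq =>
    rw [h] at heq
    injection heq with hc
    rw [hc]
  · next heq => rw [h] at heq; cases heq

lemma pvLoopA_none {l : List Char} {i : Int}
    (h : PySem.List.pyGet? l i = none) : pvLoopA l i = i := by
  rw [pvLoopA]
  split
  · next c' heq => rw [h] at heq; cases heq
  · rfl

-- B computes the length of the digit prefix of the slice
lemma pvAltEq (theBuf : String) (theOfs : Int) :
    sliceFloatingLiteralDigitSequence_py_alt theBuf theOfs
      = ((PySem.List.slice theBuf.toList (some theOfs) none).takeWhile pvDig).length := by
  unfold sliceFloatingLiteralDigitSequence_py_alt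
  dsimp only
  have hpd : (fun c => pvDigits.contains c) = pvDig := rfl
  rw [hpd]
  have hlen := congrArg List.length
    (List.takeWhile_append_dropWhile (p := pvDig)
      (l := PySem.List.slice theBuf.toList (some theOfs) none))
  rw [List.length_append] at hlen
  omega

-- A's loop from a nonnegative index counts the digit prefix of the suffix
lemma pvLoopA_nonneg (l : List Char) (k : Nat) :
    pvLoopA l (k : Int) = (k : Int) + ((l.drop k).takeWhile pvDig).length := by
  by_cases hk : k < l.length
  · have hget : PySem.List.pyGet? l (k : Int) = some l[k] := by
      rw [PySem.List.pyGet?_natCast]; exact List.getElem?_eq_getElem hk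
    rw [pvLoopA_some hget]
    have hdrop : l.drop k = l[k] :: l.drop (k + 1) := List.drop_eq_getElem_cons hk
    by_cases hd : pvDigits.contains l[k] = true
    · have hdig : pvDig l[k] = true := hd
      rw [if_pos hd]
      have hcast : ((k : Int) + 1) = ((k + 1 : Nat) : Int) := by push_cast; ring
      rw [hcast, pvLoopA_nonneg l (k + 1), hdrop,
        List.takeWhile_cons_of_pos hdig]
      simp only [List.length_cons]
      push_cast; ring
    · have hdig : ¬ pvDig l[k] = true := hd
      rw [if_neg hd, hdrop, List.takeWhile_cons_of_neg (by simpa using hdig)]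
      simp
  · have hget : PySem.List.pyGet? l (k : Int) = none := by
      rw [PySem.List.pyGet?_natCast]
      exact List.getElem?_eq_none (by omega)
    rw [pvLoopA_none hget, List.drop_eq_nil_of_le (by omega : l.length <= k)]
    simp

-- A's loop from a negative in-range index: scans the suffix, and if the whole suffix
-- is digits wraps around to index 0
lemma pvLoopA_neg (l : List Char) (k : Nat) (hk0 : 0 < k) (hkl : k <= l.length) :
    pvLoopA l (-(k : Int)) =
      (if (l.drop (l.length - k)).all pvDig
        then pvLoopA l 0
        else -(k : Int) + ((l.drop (l.length - k)).takeWhile pvDig).length) := by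
  have hlt : l.length - k < l.length := by omega
  have hdrop : l.drop (l.length - k) = l[l.length - k] :: l.drop (l.length - k + 1) :=
    List.drop_eq_getElem_cons hlt
  have hget : PySem.List.pyGet? l (-(k : Int)) = some l[l.length - k] := by
    rw [PySem.List.pyGet?_neg_natCast l k hk0 hkl]
    exact List.getElem?_eq_getElem hlt
  rw [pvLoopA_some hget]
  by_cases hd : pvDigits.contains l[l.length - k] = true
  · have hdig : pvDig l[l.length - k] = true := hd
    rw [if_pos hd]
    by_cases hk1 : k = 1
    · subst hk1
      have h0 : (-((1 : Nat) : Int) + 1) = (((0 : Nat) : Int)) := by norm_num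
      rw [h0]
      have hall : (l.drop (l.length - 1)).all pvDig = true := by
        rw [hdrop, List.drop_eq_nil_of_le (by omega : l.length <= l.length - 1 + 1)]
        simp [hdig]
      rw [if_pos hall]
      norm_num
    · have hrec : (-((k : Nat) : Int) + 1) = -(((k - 1 : Nat)) : Int) := by
        have h1 : (1 : Nat) <= k := hk0
        push_cast [h1]; ring
      rw [hrec, pvLoopA_neg l (k - 1) (by omega) (by omega)]
      have hidx : l.length - (k - 1) = l.length - k + 1 := by omega
      rw [hidx]
      by_cases hall : (l.drop (l.length - k + 1)).all pvDig = true
      · have hall' : (l.drop (l.length - k)).all pvDig = true := by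
          rw [hdrop, List.all_cons, hdig, hall]; rfl
        rw [if_pos hall, if_pos hall']
      · have hall' : ¬ (l.drop (l.length - k)).all pvDig = true := by
          rw [hdrop, List.all_cons, hdig]
          simpa using hall
        rw [if_neg hall, if_neg hall', hdrop, List.takeWhile_cons_of_pos hdig]
        simp only [List.length_cons]
        have h1 : (1 : Nat) <= k := hk0
        push_cast [h1]; ring
  · have hdig : ¬ pvDig l[l.length - k] = true := hd
    rw [if_neg hd]
    have hall : ¬ (l.drop (l.length - k)).all pvDig = true := by
      rw [hdrop, List.all_cons]
      simp [hdig]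
    rw [if_neg hall, hdrop, List.takeWhile_cons_of_neg (by simpa using hdig)]
    simp
termination_by k
decreasing_by omega

-- A's loop from an index below -len(l) stops at once (IndexError)
lemma pvLoopA_under (l : List Char) (i : Int) (h : i < -(l.length : Int)) :
    pvLoopA l i = i := by
  apply pvLoopA_none
  rw [PySem.List.pyGet?_eq_none_iff]
  intro hr
  have := hr.1
  omega

-- all-digits lists: takeWhile keeps everything
lemma pvTakeWhile_all (l : List Char) (h : l.all pvDig = true) :
    l.takeWhile pvDig = l :=
  List.takeWhile_eq_self_iff.2 (by simpa [List.all_eq_true] using h)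

-- head digit => digit prefix nonempty
lemma pvRun_pos (l : List Char) (hne : l ≠ [])
    (hh : (l.take 1).all pvDig = true) : 0 < (l.takeWhile pvDig).length := by
  cases l with
  | nil => exact absurd rfl hne
  | cons c t =>
    have h1 : (c :: t).take 1 = [c] := rfl
    rw [h1, List.all_cons] at hh
    simp only [List.all_nil, Bool.and_true] at hh
    rw [List.takeWhile_cons_of_pos hh]
    simp

-- head not digit => digit prefix empty
lemma pvRun_zero (l : List Char)
    (hh : ¬ (l.take 1).all pvDig = true) : (l.takeWhile pvDig).length = 0 := by
  cases l with
  | nil => simp at hh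
  | cons c t =>
    have h1 : (c :: t).take 1 = [c] := rfl
    rw [h1, List.all_cons] at hh
    simp only [List.all_nil, Bool.and_true] at hh
    rw [List.takeWhile_cons_of_neg (by simpa using hh)]
    simp

lemma pvSlice_neg (l : List Char) (i : Int) (hi : i < 0) :
    PySem.List.slice l (some i) none = l.drop (l.length - (-i).toNat) := by
  have hk : 0 < (-i).toNat := by omega
  have hi' : some i = some (-(((-i).toNat : Nat) : Int)) := by congr 1; omega
  rw [hi', PySem.List.slice_from_neg_natCast l (-i).toNat hk]

-- the two results, as a single characterisation used by both verdicts
lemma pvMain (theBuf : String) (theOfs : Int) :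
    (¬ D_sliceFloatingLiteralDigitSequence_py theBuf theOfs →
      sliceFloatingLiteralDigitSequence_py theBuf theOfs
        = sliceFloatingLiteralDigitSequence_py_alt theBuf theOfs) ∧
    (D_sliceFloatingLiteralDigitSequence_py theBuf theOfs →
      sliceFloatingLiteralDigitSequence_py theBuf theOfs
        ≠ sliceFloatingLiteralDigitSequence_py_alt theBuf theOfs) := by
  rw [pvAltEq]
  unfold sliceFloatingLiteralDigitSequence_py D_sliceFloatingLiteralDigitSequence_py
  have hpd : (fun c => pvDigits.contains c) = pvDig := rfl
  rw [hpd]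
  set l := theBuf.toList with hl
  by_cases hofs : 0 <= theOfs
  · -- nonnegative offset: never in D_, and A = B
    obtain ⟨m, rfl⟩ : ∃ m : Nat, theOfs = (m : Int) := ⟨theOfs.toNat, by omega⟩
    constructor
    · intro _
      rw [PySem.List.slice_from l hofs, pvLoopA_nonneg l m]
      simp only [Int.toNat_natCast]
      ring
    · intro hD
      exact absurd hD.1 (by omega)
  · push_neg at hofs
    by_cases hnil : l = []
    · -- empty buffer: A = 0 = B, not in D_
      constructor
      · intro _
        rw [pvLoopA_under l theOfs (by rw [hnil]; simpa using hofs), hnil,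
          PySem.List.slice_some_none, List.drop_nil]
        simp
      · intro hD; exact absurd hnil hD.2.1
    · by_cases hund : theOfs < -(l.length : Int)
      · -- offset below -len: A = 0, B = digit prefix of the whole buffer
        have hA : pvLoopA l theOfs = theOfs := pvLoopA_under l theOfs hund
        have hs : PySem.List.slice l (some theOfs) none = l := by
          rw [pvSlice_neg l theOfs hofs]
          have h0 : l.length - (-theOfs).toNat = 0 := by omega
          rw [h0, List.drop_zero]
        rw [hA, hs]
        constructor
        · intro hnD
          by_cases hh : (l.take 1).all pvDig = true
          · exact absurd ⟨hofs, hnil, hh, Or.inl hund⟩ hnD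
          · rw [pvRun_zero l hh]
            ring
        · rintro ⟨-, -, hh, -⟩
          have := pvRun_pos l hnil hh
          omega
      · -- in-range negative offset
        push_neg at hund
        set k : Nat := (-theOfs).toNat with hkdef
        have hofs' : theOfs = -(k : Int) := by omega
        have hk0 : 0 < k := by omega
        have hkl : k <= l.length := by omega
        have hs : PySem.List.slice l (some theOfs) none = l.drop (l.length - k) := by
          rw [pvSlice_neg l theOfs hofs]
        rw [hs, hofs', pvLoopA_neg l k hk0 hkl]
        by_cases hall : (l.drop (l.length - k)).all pvDig = true
        · -- suffix all digits: A wraps around to the front of the buffer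
          rw [if_pos hall]
          have h0 : pvLoopA l 0 = ((l.takeWhile pvDig).length : Int) := by
            have h00 := pvLoopA_nonneg l 0
            simpa using h00
          have hlen : (l.drop (l.length - k)).length = k := by
            rw [List.length_drop]; omega
          rw [h0, pvTakeWhile_all _ hall, hlen]
          constructor
          · intro hnD
            by_cases hh : (l.take 1).all pvDig = true
            · exact absurd ⟨by omega, hnil, hh, Or.inr hall⟩ hnD
            · have := pvRun_zero l hh
              omega
          · rintro ⟨-, -, hh, -⟩
            have := pvRun_pos l hnil hh
            omega
        · -- suffix has a non-digit: both count its digit prefix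
          rw [if_neg hall]
          constructor
          · intro _; ring
          · rintro ⟨-, -, -, hor⟩
            rcases hor with h1 | h2
            · omega
            · exact absurd h2 hall

-- ===== VERDICT (by name: the statement is the Claim_ definition above) =====
theorem sliceFloatingLiteralDigitSequence_py_spec : Claim_unchanged_sliceFloatingLiteralDigitSequence_py := by
  intro theBuf theOfs _ hnD
  exact (pvMain theBuf theOfs).1 hnD

theorem sliceFloatingLiteralDigitSequence_py_changed : Claim_changed_sliceFloatingLiteralDigitSequence_py := by
  unfold Claim_changed_sliceFloatingLiteralDigitSequence_py
  refine ⟨by decide, by decide, ?_, by decide, by decide⟩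
  show sliceFloatingLiteralDigitSequence_py "5" (-1) = 2
  unfold sliceFloatingLiteralDigitSequence_py
  rw [pvLoopA_some (l := "5".toList) (i := -1) (c := '5') (by decide)]
  rw [if_pos (by decide : pvDigits.contains '5' = true)]
  rw [pvLoopA_some (l := "5".toList) (i := -1 + 1) (c := '5') (by decide)]
  rw [if_pos (by decide : pvDigits.contains '5' = true)]
  rw [pvLoopA_none (l := "5".toList) (i := -1 + 1 + 1) (by decide)]
  norm_num

theorem sliceFloatingLiteralDigitSequence_py_tight : Claim_exact_sliceFloatingLiteralDigitSequence_py := by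
  intro theBuf theOfs _ hD
  exact (pvMain theBuf theOfs).2 hD
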